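-- pv_equiv track=rewrite | github.com/Dropkick0/visualizer | app/utils.py | clean_code_candidate
-- ===== SOURCE A (Python) =====
-- def clean_code_candidate(tok: str) -> str:
--     """
--     Clean OCR text to extract 4-digit image codes
--     Maps common OCR errors: O->0, I->1, l->1, B->8, S->5
--     """
--     if not tok:
--         return ""
--
--     # Character mapping for common OCR errors
--     char_map = str.maketrans({
--         'O': '0', 'o': '0',
--         'I': '1', 'l': '1',
--         'B': '8',
--         'S': '5',
--         'G': '6'
--     })
--
--     # Apply character mapping and keep only digits
--     cleaned = tok.translate(char_map)
--     digits = ''.join(ch for ch in cleaned if ch.isdigit())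
--
--     # Return last 4 digits if longer, or all digits if shorter
--     return digits[-4:] if len(digits) >= 4 else digits
-- ===== SOURCE B (Python) =====
-- def clean_code_candidate(tok: str) -> str:
--     """Extract the last up-to-4 digits via a single reversed early-terminating scan."""
--     if not tok:
--         return ""
--     char_map = {'O': '0', 'o': '0', 'I': '1', 'l': '1', 'B': '8', 'S': '5', 'G': '6'}
--     out = []
--     for ch in reversed(tok):
--         m = char_map.get(ch, ch)
--         if m.isdigit():
--             out.append(m)
--             if len(out) == 4:
--                 break
--     return ''.join(reversed(out))
-- ===== Notes on version B (the rewrite author's own statement) =====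
-- stated objective: alternative
-- what changed: Replaces the full translate-filter-then-slice pipeline with a single reversed scan that maps each character, collects digits and stops as soon as four are found, then reverses the collected list.
import Mathlib
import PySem

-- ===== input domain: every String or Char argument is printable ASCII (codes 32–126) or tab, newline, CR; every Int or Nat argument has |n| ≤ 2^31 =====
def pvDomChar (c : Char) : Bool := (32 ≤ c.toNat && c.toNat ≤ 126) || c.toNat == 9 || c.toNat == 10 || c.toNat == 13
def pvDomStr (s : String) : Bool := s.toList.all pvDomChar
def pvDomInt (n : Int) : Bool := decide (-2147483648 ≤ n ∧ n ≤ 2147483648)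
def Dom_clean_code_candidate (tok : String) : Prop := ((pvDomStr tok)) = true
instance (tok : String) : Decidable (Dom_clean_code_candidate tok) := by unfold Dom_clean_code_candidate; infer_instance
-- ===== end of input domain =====

-- B replaces the translate-filter-then-slice pipeline by a single reversed early-terminating scan (alternative decomposition, same cost).

-- ===== PORT A =====
-- the OCR char map (shared by both Pythons verbatim)
def pvMapChar (c : Char) : Char :=
  if c = 'O' ∨ c = 'o' then '0'
  else if c = 'I' ∨ c = 'l' then '1'
  else if c = 'B' then '8'
  else if c = 'S' then '5'
  else if c = 'G' then '6'
  else c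

def clean_code_candidate (tok : String) : String :=
  if tok.toList = [] then ""
  else
    let cleaned := tok.toList.map pvMapChar
    let digits := cleaned.filter (fun ch => PySem.Chars.isdigit ch)
    if digits.length ≥ 4 then String.ofList (PySem.List.slice digits (some (-4)) none)
    else String.ofList digits

-- ===== PORT B =====
-- reversed scan: append mapped digits to `acc`, stop once four are collected
def pvCollect : List Char → List Char → List Char
  | acc, [] => acc
  | acc, c :: rest =>
    let m := pvMapChar c
    if PySem.Chars.isdigit m then
      let acc' := acc ++ [m]
      if acc'.length = 4 then acc' else pvCollect acc' rest
    else pvCollect acc rest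

def clean_code_candidate_alt (tok : String) : String :=
  if tok.toList = [] then ""
  else String.ofList (pvCollect [] tok.toList.reverse).reverse

-- ===== PRECONDITION & SPEC =====
def Spec_clean_code_candidate (tok : String) (out : String) : Prop := out = clean_code_candidate_alt tok
instance (tok : String) (out : String) : Decidable (Spec_clean_code_candidate tok out) := by unfold Spec_clean_code_candidate; infer_instance

-- ===== CLAIM (what is proved, stated in full; the proofs are below) =====
def Claim_equal_clean_code_candidate : Prop := ∀ (tok : String), Dom_clean_code_candidate tok → Spec_clean_code_candidate tok (clean_code_candidate tok)

-- ===== LEMMAS AND PROOFS =====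

-- the digit stream both programs extract from a character list
def pvDigits (l : List Char) : List Char :=
  (l.map pvMapChar).filter (fun ch => PySem.Chars.isdigit ch)

lemma pvDigits_reverse (l : List Char) : pvDigits l.reverse = (pvDigits l).reverse := by
  simp [pvDigits, List.filter_reverse]

-- loop invariant: with fewer than 4 collected, the scan appends the next (4 - |acc|) digits
lemma pvCollect_eq (l : List Char) : ∀ acc : List Char, acc.length < 4 →
    pvCollect acc l = acc ++ (pvDigits l).take (4 - acc.length) := by
  induction l with
  | nil => intro acc _; simp [pvCollect, pvDigits]
  | cons c rest ih =>
    intro acc hacc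
    simp only [pvCollect, pvDigits, List.map_cons, List.filter_cons]
    by_cases hd : PySem.Chars.isdigit (pvMapChar c) = true
    · simp only [hd, if_pos, List.length_append, List.length_cons, List.length_nil]
      by_cases h4 : acc.length + 1 = 4
      · have : 4 - acc.length = 1 := by omega
        simp [h4, this]
      · have hlt : (acc ++ [pvMapChar c]).length < 4 := by
          simp only [List.length_append, List.length_cons, List.length_nil]; omega
        rw [if_neg (by simpa using h4), ih _ hlt]
        have h1 : 4 - (acc ++ [pvMapChar c]).length = 4 - acc.length - 1 := by
          simp only [List.length_append, List.length_cons, List.length_nil]; omega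
        obtain ⟨k, hk⟩ : ∃ k, 4 - acc.length = k + 1 := ⟨4 - acc.length - 1, by omega⟩
        have h3 : 3 - acc.length = k := by omega
        simp [hk, h3, List.take_succ_cons, List.append_assoc, pvDigits]
    · simp only [hd]
      rw [ih _ hacc]
      simp [pvDigits]

-- both sides equal the last (up to) four digits: drop (len - 4)
lemma pvTake_reverse_reverse (l : List Char) :
    (l.reverse.take 4).reverse = l.drop (l.length - 4) := by
  rw [List.take_reverse, List.reverse_reverse]

theorem clean_code_candidate_spec : Claim_equal_clean_code_candidate := by
  intro tok _
  unfold Spec_clean_code_candidate clean_code_candidate clean_code_candidate_alt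
  by_cases h : tok.toList = []
  · simp [h]
  · simp only [h, if_false]
    rw [pvCollect_eq _ [] (by norm_num), List.nil_append]
    simp only [List.length_nil, Nat.sub_zero]
    rw [pvDigits_reverse, pvTake_reverse_reverse]
    unfold pvDigits
    by_cases hlen : 4 ≤ (List.filter (fun ch => PySem.Chars.isdigit ch) (tok.toList.map pvMapChar)).length
    · rw [if_pos hlen, PySem.List.slice_from_neg_ofNat _ 4 (by omega)]
    · rw [if_neg hlen]
      have h0 : (List.filter (fun ch => PySem.Chars.isdigit ch) (tok.toList.map pvMapChar)).length - 4 = 0 := by omega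
      rw [h0, List.drop_zero]
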